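-- pv_equiv track=rewrite | github.com/arkanwolfshade/MythosMUD | scripts/audit_suppressions.py | group_by_tool
-- ===== SOURCE A (Python) =====
-- from typing import Any
--
-- def group_by_tool(all_suppressions: list[dict[str, Any]]) -> dict[str, dict[str, int]]:
--     """
--     Group suppressions by tool and calculate statistics.
--
--     Args:
--         all_suppressions: List of all suppressions
--
--     Returns:
--         Dictionary mapping tool names to statistics
--     """
--     by_tool: dict[str, dict[str, int]] = {}
--     for supp in all_suppressions:
--         tool = supp["tool"]
--         if tool not in by_tool:
--             by_tool[tool] = {"total": 0, "with_explanation": 0, "without_explanation": 0}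
--         by_tool[tool]["total"] += 1
--         if supp["has_explanation"]:
--             by_tool[tool]["with_explanation"] += 1
--         else:
--             by_tool[tool]["without_explanation"] += 1
--     return by_tool
-- ===== SOURCE B (Python) =====
-- def group_by_tool(all_suppressions):
--     """Group suppressions by tool and calculate statistics.
--
--     Two-pass decomposition: first build an index tool -> list of explanation
--     flags, then aggregate each group's counts in one step.
--     """
--     groups = {}
--     for supp in all_suppressions:
--         tool = supp["tool"]
--         flag = bool(supp["has_explanation"])
--         groups.setdefault(tool, []).append(flag)
--     result = {}
--     for tool, flags in groups.items():
--         total = len(flags)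
--         with_explanation = sum(1 for b in flags if b)
--         result[tool] = {
--             "total": total,
--             "with_explanation": with_explanation,
--             "without_explanation": total - with_explanation,
--         }
--     return result
-- ===== Notes on version B (the rewrite author's own statement) =====
-- stated objective: alternative
-- what changed: A interleaves group creation and three counter increments in one loop over nested dicts; B first builds an index tool -> list of explanation flags, then aggregates each group's stats (total, with = sum of flags, without = total - with) in a second pass.
import Mathlib
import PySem

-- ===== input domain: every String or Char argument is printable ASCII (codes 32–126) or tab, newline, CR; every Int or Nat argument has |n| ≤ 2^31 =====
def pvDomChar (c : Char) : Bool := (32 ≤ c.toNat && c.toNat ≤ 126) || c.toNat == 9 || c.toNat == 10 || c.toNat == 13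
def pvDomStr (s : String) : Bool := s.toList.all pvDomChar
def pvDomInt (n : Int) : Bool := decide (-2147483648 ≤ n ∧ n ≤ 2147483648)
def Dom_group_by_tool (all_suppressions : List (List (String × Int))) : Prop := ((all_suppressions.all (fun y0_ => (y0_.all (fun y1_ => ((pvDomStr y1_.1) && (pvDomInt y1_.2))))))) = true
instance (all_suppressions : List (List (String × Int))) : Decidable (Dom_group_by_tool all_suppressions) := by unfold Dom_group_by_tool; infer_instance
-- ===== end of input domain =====

-- B replaces A's single loop over nested counter dicts by a two-pass decomposition
-- (index tool -> explanation flags, then aggregate each group); same cost, different structure.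


-- ===== PORT A =====
-- {"total": 0, "with_explanation": 0, "without_explanation": 0}
def pvEmptyStats : PySem.Dict String Int :=
  PySem.Dict.mk [("total", 0), ("with_explanation", 0), ("without_explanation", 0)]

def group_by_tool (all_suppressions : List (List (String × Int))) : List (Int × List (String × Int)) :=
  let by_tool : PySem.Dict Int (PySem.Dict String Int) :=
    all_suppressions.foldl (fun by_tool supp =>
      -- supp["tool"]; Pre_ guarantees the key is present (Python raises KeyError otherwise)
      let tool := (PySem.Dict.mk supp).getD "tool" 0
      let by_tool := if by_tool.contains tool then by_tool else by_tool.insert tool pvEmptyStats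
      -- by_tool[tool]["total"] += 1
      let by_tool := by_tool.modify tool (PySem.Dict.mk []) (fun inner => inner.modify "total" 0 (· + 1))
      -- supp["has_explanation"]; Pre_ guarantees the key (truthiness of an int: != 0)
      if ((PySem.Dict.mk supp).getD "has_explanation" 0) != 0 then
        by_tool.modify tool (PySem.Dict.mk []) (fun inner => inner.modify "with_explanation" 0 (· + 1))
      else
        by_tool.modify tool (PySem.Dict.mk []) (fun inner => inner.modify "without_explanation" 0 (· + 1))
    ) PySem.Dict.empty
  by_tool.items.map (fun p => (p.1, p.2.items))

-- ===== PORT B =====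
def group_by_tool_alt (all_suppressions : List (List (String × Int))) : List (Int × List (String × Int)) :=
  -- first pass: groups.setdefault(tool, []).append(flag)
  let groups : PySem.Dict Int (List Bool) :=
    all_suppressions.foldl (fun groups supp =>
      let tool := (PySem.Dict.mk supp).getD "tool" 0
      let flag := ((PySem.Dict.mk supp).getD "has_explanation" 0) != 0
      groups.modify tool [] (· ++ [flag])) PySem.Dict.empty
  -- second pass: aggregate each group's flags
  groups.items.map (fun p =>
    let total : Int := p.2.length
    let w : Int := p.2.countP (fun b => b)   -- sum(1 for b in flags if b)
    (p.1, [("total", total), ("with_explanation", w), ("without_explanation", total - w)]))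

-- ===== PRECONDITION & SPEC =====
-- Pre_ excludes exactly the inputs where A raises KeyError: a suppression dict
-- lacking the "tool" or "has_explanation" key (B raises there too).
def Pre_group_by_tool (all_suppressions : List (List (String × Int))) : Prop :=
  ∀ supp ∈ all_suppressions,
    (PySem.Dict.mk supp).contains "tool" = true ∧
    (PySem.Dict.mk supp).contains "has_explanation" = true
instance (all_suppressions : List (List (String × Int))) : Decidable (Pre_group_by_tool all_suppressions) := by unfold Pre_group_by_tool; infer_instance

def pvWitness_group_by_tool : (List (List (String × Int))) :=
  [[("tool", 1), ("has_explanation", 0)], [("tool", 1), ("has_explanation", 2)], [("tool", 3), ("has_explanation", 1)]]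

def Spec_group_by_tool (all_suppressions : List (List (String × Int))) (out : List (Int × List (String × Int))) : Prop := out = group_by_tool_alt all_suppressions
instance (all_suppressions : List (List (String × Int))) (out : List (Int × List (String × Int))) : Decidable (Spec_group_by_tool all_suppressions out) := by unfold Spec_group_by_tool; infer_instance

-- ===== CLAIM (what is proved, stated in full; the proofs are below) =====
def Claim_equal_group_by_tool : Prop := ∀ (all_suppressions : List (List (String × Int))), Dom_group_by_tool all_suppressions → Pre_group_by_tool all_suppressions → Spec_group_by_tool all_suppressions (group_by_tool all_suppressions)

-- ===== LEMMAS AND PROOFS =====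

-- the two key reads both loops perform per element
def pvToolOf (supp : List (String × Int)) : Int := (PySem.Dict.mk supp).getD "tool" 0
def pvFlagOf (supp : List (String × Int)) : Bool := ((PySem.Dict.mk supp).getD "has_explanation" 0) != 0

-- A's loop body and B's loop body, named (definitionally equal to the port lambdas)
def pvStepA (bt : PySem.Dict Int (PySem.Dict String Int)) (supp : List (String × Int)) :
    PySem.Dict Int (PySem.Dict String Int) :=
  if pvFlagOf supp then
    (((if bt.contains (pvToolOf supp) then bt else bt.insert (pvToolOf supp) pvEmptyStats).modify
        (pvToolOf supp) (PySem.Dict.mk []) (fun inner => inner.modify "total" 0 (· + 1))).modify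
      (pvToolOf supp) (PySem.Dict.mk []) (fun inner => inner.modify "with_explanation" 0 (· + 1)))
  else
    (((if bt.contains (pvToolOf supp) then bt else bt.insert (pvToolOf supp) pvEmptyStats).modify
        (pvToolOf supp) (PySem.Dict.mk []) (fun inner => inner.modify "total" 0 (· + 1))).modify
      (pvToolOf supp) (PySem.Dict.mk []) (fun inner => inner.modify "without_explanation" 0 (· + 1)))

def pvStepB (g : PySem.Dict Int (List Bool)) (supp : List (String × Int)) :
    PySem.Dict Int (List Bool) :=
  g.modify (pvToolOf supp) [] (· ++ [pvFlagOf supp])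

-- the inner stats dict A maintains for a group whose flag list is bs
def pvStats (bs : List Bool) : PySem.Dict String Int :=
  PySem.Dict.mk [("total", (bs.length : Int)),
                 ("with_explanation", (bs.countP (fun b => b) : Int)),
                 ("without_explanation", (bs.length : Int) - (bs.countP (fun b => b) : Int))]

def pvMapA (g : PySem.Dict Int (List Bool)) : PySem.Dict Int (PySem.Dict String Int) :=
  PySem.Dict.mk (g.items.map (fun p => (p.1, pvStats p.2)))

theorem pv_contains_mapA (g : PySem.Dict Int (List Bool)) (k : Int) :
    (pvMapA g).contains k = g.contains k := by
  simp [pvMapA, PySem.Dict.contains, List.any_map, Function.comp_def]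

theorem pv_get?_mapA (g : PySem.Dict Int (List Bool)) (k : Int) :
    (pvMapA g).get? k = (g.get? k).map pvStats := by
  simp only [pvMapA, PySem.Dict.get?, List.find?_map, Function.comp_def]
  cases g.items.find? (fun p => p.1 == k) <;> rfl

theorem pv_insert_mapA (g : PySem.Dict Int (List Bool)) (k : Int) (bs : List Bool) :
    (pvMapA g).insert k (pvStats bs) = pvMapA (g.insert k bs) := by
  simp only [PySem.Dict.insert, pv_contains_mapA]
  by_cases h : g.contains k = true
  · simp only [h, if_true, pvMapA, List.map_map]
    congr 1
    apply List.map_congr_left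
    intro p _
    by_cases hp : p.1 == k <;> simp [Function.comp, hp]
  · simp [h, pvMapA]

theorem pv_stats_step (bs : List Bool) (flag : Bool) :
    (if flag then
       ((pvStats bs).modify "total" 0 (· + 1)).modify "with_explanation" 0 (· + 1)
     else
       ((pvStats bs).modify "total" 0 (· + 1)).modify "without_explanation" 0 (· + 1))
    = pvStats (bs ++ [flag]) := by
  cases flag <;> (apply PySem.Dict.ext)
  all_goals
    simp [pvStats, PySem.Dict.modify, PySem.Dict.insert, PySem.Dict.contains,
          PySem.Dict.getD, PySem.Dict.get?, List.countP_append] <;> omega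

-- A's two nested-modify increments on the mapped dict = one group append on the index
theorem pv_modify_chain (g : PySem.Dict Int (List Bool)) (tool : Int) (bs : List Bool)
    (flag : Bool) (h : g.get? tool = some bs) :
    (if flag then
       (((pvMapA g).modify tool (PySem.Dict.mk [])
           (fun inner => inner.modify "total" 0 (· + 1))).modify tool (PySem.Dict.mk [])
         (fun inner => inner.modify "with_explanation" 0 (· + 1)))
     else
       (((pvMapA g).modify tool (PySem.Dict.mk [])
           (fun inner => inner.modify "total" 0 (· + 1))).modify tool (PySem.Dict.mk [])
         (fun inner => inner.modify "without_explanation" 0 (· + 1))))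
    = pvMapA (g.insert tool (bs ++ [flag])) := by
  have hget : (pvMapA g).getD tool (PySem.Dict.mk []) = pvStats bs := by
    simp [PySem.Dict.getD, pv_get?_mapA, h]
  rw [← pv_insert_mapA, ← pv_stats_step bs flag]
  cases flag <;>
    simp only [Bool.false_eq_true, if_true, if_false, PySem.Dict.modify, hget,
      PySem.Dict.getD_insert_self, PySem.Dict.insert_insert_self]

theorem pv_step_comm (g : PySem.Dict Int (List Bool)) (supp : List (String × Int)) :
    pvStepA (pvMapA g) supp = pvMapA (pvStepB g supp) := by
  have hstep : pvStepA (pvMapA g) supp =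
      (if pvFlagOf supp then
        (((if (pvMapA g).contains (pvToolOf supp) then pvMapA g
           else (pvMapA g).insert (pvToolOf supp) pvEmptyStats).modify
            (pvToolOf supp) (PySem.Dict.mk []) (fun inner => inner.modify "total" 0 (· + 1))).modify
          (pvToolOf supp) (PySem.Dict.mk []) (fun inner => inner.modify "with_explanation" 0 (· + 1)))
      else
        (((if (pvMapA g).contains (pvToolOf supp) then pvMapA g
           else (pvMapA g).insert (pvToolOf supp) pvEmptyStats).modify
            (pvToolOf supp) (PySem.Dict.mk []) (fun inner => inner.modify "total" 0 (· + 1))).modify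
          (pvToolOf supp) (PySem.Dict.mk []) (fun inner => inner.modify "without_explanation" 0 (· + 1)))) := rfl
  rw [hstep]
  set tool := pvToolOf supp with htool
  set flag := pvFlagOf supp with hflag
  rw [pv_contains_mapA]
  by_cases hc : g.contains tool = true
  · obtain ⟨bs, hbs⟩ : ∃ bs, g.get? tool = some bs := by
      rcases h : g.get? tool with _ | bs
      · rw [PySem.Dict.contains_eq_isSome_get?, h] at hc; simp at hc
      · exact ⟨bs, rfl⟩
    have hB : g.getD tool [] = bs := by simp [PySem.Dict.getD, hbs]
    rw [if_pos hc, pv_modify_chain g tool bs flag hbs]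
    unfold pvStepB
    rw [← htool, ← hflag]
    simp [PySem.Dict.modify, hB]
  · have hn : g.get? tool = none := by
      rcases h : g.get? tool with _ | bs
      · rfl
      · rw [PySem.Dict.contains_eq_isSome_get?, h] at hc; simp at hc
    have hB : g.getD tool [] = [] := by simp [PySem.Dict.getD, hn]
    have hinit : (pvMapA g).insert tool pvEmptyStats = pvMapA (g.insert tool []) := by
      have h0 : pvEmptyStats = pvStats [] := by decide
      rw [h0, pv_insert_mapA]
    rw [if_neg hc, hinit,
        pv_modify_chain (g.insert tool []) tool [] flag (PySem.Dict.get?_insert_self _ _ _),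
        PySem.Dict.insert_insert_self]
    unfold pvStepB
    rw [← htool, ← hflag]
    simp [PySem.Dict.modify, hB]

theorem pv_fold_comm (xs : List (List (String × Int))) (g : PySem.Dict Int (List Bool)) :
    xs.foldl pvStepA (pvMapA g) = pvMapA (xs.foldl pvStepB g) := by
  induction xs generalizing g with
  | nil => rfl
  | cons x xs ih => simp only [List.foldl_cons, pv_step_comm, ih]

-- ===== VERDICT (by name: the statement is the Claim_ definition above) =====
theorem group_by_tool_spec : Claim_equal_group_by_tool := by
  intro xs _ _
  unfold Spec_group_by_tool group_by_tool group_by_tool_alt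
  have hA : xs.foldl (fun by_tool supp =>
        let tool := (PySem.Dict.mk supp).getD "tool" 0
        let by_tool := if by_tool.contains tool then by_tool else by_tool.insert tool pvEmptyStats
        let by_tool := by_tool.modify tool (PySem.Dict.mk []) (fun inner => inner.modify "total" 0 (· + 1))
        if ((PySem.Dict.mk supp).getD "has_explanation" 0) != 0 then
          by_tool.modify tool (PySem.Dict.mk []) (fun inner => inner.modify "with_explanation" 0 (· + 1))
        else
          by_tool.modify tool (PySem.Dict.mk []) (fun inner => inner.modify "without_explanation" 0 (· + 1)))
      PySem.Dict.empty
      = xs.foldl pvStepA PySem.Dict.empty := rfl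
  have hB : xs.foldl (fun groups supp =>
        let tool := (PySem.Dict.mk supp).getD "tool" 0
        let flag := ((PySem.Dict.mk supp).getD "has_explanation" 0) != 0
        groups.modify tool [] (· ++ [flag])) PySem.Dict.empty
      = xs.foldl pvStepB PySem.Dict.empty := rfl
  simp only [hA, hB]
  have hempty : (PySem.Dict.empty : PySem.Dict Int (PySem.Dict String Int)) = pvMapA PySem.Dict.empty := rfl
  rw [hempty, pv_fold_comm]
  simp only [pvMapA, List.map_map]
  apply List.map_congr_left
  intro p _
  simp [Function.comp, pvStats]
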